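-- pv_equiv track=rewrite | github.com/GundalaNikhil/DSA | dsa-problems/Arrays/solutions/python/ARR-015-seat-gap-after-removals.py | max_gap_after_removals
-- ===== SOURCE A (Python) =====
-- def max_gap_after_removals(seats: list[int], remove_indices: list[int]) -> int:
--     n = len(seats)
--     removed = [False] * n
--
--     for idx in remove_indices:
--         # Bounds check to avoid index errors
--         if 0 <= idx < n:
--             removed[idx] = True
--
--     max_gap = 0
--     last_pos = None
--
--     for i in range(n):
--         if not removed[i]:
--             current_pos = seats[i]
--             if last_pos is not None:
--                 max_gap = max(max_gap, current_pos - last_pos)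
--             last_pos = current_pos
--
--     return max_gap
-- ===== SOURCE B (Python) =====
-- def _dc(xs):
--     # max consecutive difference (floored at 0) by divide and conquer:
--     # split at the middle, recurse on both halves, combine with the one
--     # cross-boundary pair xs[m] - xs[m-1]; base case (fewer than 2) is 0.
--     if len(xs) < 2:
--         return 0
--     m = len(xs) // 2
--     return max(_dc(xs[:m]), _dc(xs[m:]), xs[m] - xs[m - 1])
--
--
-- def max_gap_after_removals(seats: list[int], remove_indices: list[int]) -> int:
--     n = len(seats)
--     removed = {idx for idx in remove_indices if 0 <= idx < n}
--     remaining = [seats[i] for i in range(n) if i not in removed]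
--     return _dc(remaining)
-- ===== Notes on version B (the rewrite author's own statement) =====
-- stated objective: alternative
-- what changed: Replaces A's fused marker-array + running-state linear scan (max_gap/last_pos accumulator) with a removed-index set, a filter pass producing the remaining seats, and a recursive divide-and-conquer maximum: split at the midpoint, recurse on both halves and combine with the single cross-boundary difference.
import Mathlib
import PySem

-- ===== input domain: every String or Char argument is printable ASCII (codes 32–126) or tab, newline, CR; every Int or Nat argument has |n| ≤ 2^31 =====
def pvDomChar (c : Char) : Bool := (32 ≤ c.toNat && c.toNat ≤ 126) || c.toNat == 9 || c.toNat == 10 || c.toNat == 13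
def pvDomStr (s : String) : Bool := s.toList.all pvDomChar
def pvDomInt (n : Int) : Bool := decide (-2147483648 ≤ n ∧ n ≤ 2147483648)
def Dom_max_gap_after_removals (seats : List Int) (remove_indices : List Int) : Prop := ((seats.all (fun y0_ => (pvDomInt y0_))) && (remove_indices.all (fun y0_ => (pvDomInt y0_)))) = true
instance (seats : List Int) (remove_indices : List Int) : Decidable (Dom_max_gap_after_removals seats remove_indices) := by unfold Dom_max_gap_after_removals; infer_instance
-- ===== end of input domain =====

-- B replaces A's fused marker-array + running-state scan by a removed-index set, a filter pass
-- producing the remaining seats, and a recursive divide-and-conquer maximum over consecutive gaps.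


-- ===== PORT A =====
-- A-side helper: one iteration of A's scan state (max_gap, last_pos)
def pvStepA (st : Int × Option Int) (cur : Int) : Int × Option Int :=
  match st.2 with
  | none => (st.1, some cur)
  | some lp => (max st.1 (cur - lp), some cur)

def max_gap_after_removals (seats : List Int) (remove_indices : List Int) : Int :=
  let n : Int := Int.ofNat seats.length
  let removed : List Bool := remove_indices.foldl
    (fun removed idx => if 0 ≤ idx ∧ idx < n then removed.set idx.toNat true else removed)
    (List.replicate seats.length false)
  -- i ranges over range(n); removed[i] and seats[i] are in range, so getD is exact
  ((List.range seats.length).foldl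
    (fun st i => if removed.getD i false then st else pvStepA st (seats.getD i 0))
    ((0 : Int), (none : Option Int))).1

-- ===== PORT B =====
-- B-side helper: _dc from Source B; xs[:m] / xs[m:] with 0 ≤ m ≤ len are exactly take/drop,
-- and xs[m], xs[m-1] are in range, so getD is exact.
def pvDC (xs : List Int) : Int :=
  if _h : xs.length < 2 then 0
  else
    let m := xs.length / 2
    max (max (pvDC (xs.take m)) (pvDC (xs.drop m))) (xs.getD m 0 - xs.getD (m - 1) 0)
termination_by xs.length
decreasing_by
  · simp only [List.length_take]; omega
  · simp only [List.length_drop]; omega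

def max_gap_after_removals_alt (seats : List Int) (remove_indices : List Int) : Int :=
  let n : Int := Int.ofNat seats.length
  let removed : PySem.Set Int :=
    PySem.Set.ofList (remove_indices.filter (fun idx => decide (0 ≤ idx ∧ idx < n)))
  -- i ranges over range(n), so seats[i] is in range and getD is exact
  let remaining : List Int := (List.range seats.length).filterMap
    (fun i => if PySem.Set.contains removed (Int.ofNat i) then none else some (seats.getD i 0))
  pvDC remaining

-- ===== PRECONDITION & SPEC =====
def Spec_max_gap_after_removals (seats : List Int) (remove_indices : List Int) (out : Int) : Prop := out = max_gap_after_removals_alt seats remove_indices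
instance (seats : List Int) (remove_indices : List Int) (out : Int) : Decidable (Spec_max_gap_after_removals seats remove_indices out) := by unfold Spec_max_gap_after_removals; infer_instance

-- ===== CLAIM (what is proved, stated in full; the proofs are below) =====
def Claim_equal_max_gap_after_removals : Prop := ∀ (seats : List Int) (remove_indices : List Int), Dom_max_gap_after_removals seats remove_indices → Spec_max_gap_after_removals seats remove_indices (max_gap_after_removals seats remove_indices)

-- ===== LEMMAS AND PROOFS =====

-- the marker array built by A answers exactly "is i a valid removed index"
theorem pv_removed_getD (n : Nat) (ris : List Int) (rm : List Bool) (hrm : rm.length = n) (i : Nat) :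
    (ris.foldl (fun removed idx => if 0 ≤ idx ∧ idx < (n : Int) then removed.set idx.toNat true else removed) rm).getD i false
      = (rm.getD i false || decide ((i : Int) ∈ ris.filter (fun idx => decide (0 ≤ idx ∧ idx < (n : Int))))) := by
  induction ris generalizing rm with
  | nil => simp
  | cons a t ih =>
    simp only [List.foldl_cons, List.filter_cons]
    by_cases h : 0 ≤ a ∧ a < (n : Int)
    · rw [if_pos h]
      rw [ih (rm.set a.toNat true) (by simp [hrm])]
      have hset : (rm.set a.toNat true).getD i false
          = if a.toNat = i then true else rm.getD i false := by
        simp only [List.getD, List.getElem?_set]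
        split_ifs with h1 h2 <;> simp_all <;> omega
      by_cases hai : a.toNat = i
      · have hia : (i : Int) = a := by omega
        rw [hset, if_pos hai]
        simp [hia, h]
      · have hia : (i : Int) ≠ a := by omega
        rw [hset, if_neg hai]
        simp [hia, h]
    · rw [if_neg h, ih rm hrm]
      simp [h]

-- a guarded foldl is a foldl over the filterMap of the unguarded elements
theorem pv_foldl_guard {α β γ : Type} (p : α → Bool) (h : α → β) (g : γ → β → γ)
    (l : List α) (init : γ) :
    l.foldl (fun st i => if p i then st else g st (h i)) init
      = (l.filterMap (fun i => if p i then none else some (h i))).foldl g init := by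
  induction l generalizing init with
  | nil => rfl
  | cons a t ih =>
    by_cases hp : p a <;> simp [hp, ih]

-- the list of consecutive differences, structurally
def pvAdj : List Int → List Int
  | [] => []
  | [_] => []
  | a :: b :: t => (b - a) :: pvAdj (b :: t)

theorem pvAdj_eq_zip (l : List Int) :
    pvAdj l = (l.zip (l.drop 1)).map (fun p => p.2 - p.1) := by
  match l with
  | [] => rfl
  | [_] => rfl
  | a :: b :: t =>
    simp only [pvAdj, List.drop_succ_cons, List.drop_zero, List.zip_cons_cons, List.map_cons]
    rw [pvAdj_eq_zip (b :: t)]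
    simp

theorem pvAdj_snoc (u : List Int) (hu : u ≠ []) (c : Int) :
    pvAdj (u ++ [c]) = pvAdj u ++ [c - u.getLastD 0] := by
  match u with
  | [] => exact absurd rfl hu
  | [a] => rfl
  | a :: b :: t =>
    have ih := pvAdj_snoc (b :: t) (by simp) c
    simp only [List.cons_append] at ih ⊢
    simp [pvAdj, ih]

theorem pvAdj_split (u : List Int) (c : Int) (v : List Int) (hu : u ≠ []) :
    pvAdj (u ++ c :: v) = pvAdj (u ++ [c]) ++ pvAdj (c :: v) := by
  match u with
  | [] => exact absurd rfl hu
  | [a] => rfl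
  | a :: b :: t =>
    have := pvAdj_split (b :: t) c v (by simp)
    simp only [List.cons_append] at this ⊢
    simp [pvAdj, this]

-- running max: init shifts out
theorem pv_foldl_max_shift (l : List Int) : ∀ c d : Int,
    l.foldl max (max c d) = max c (l.foldl max d) := by
  induction l with
  | nil => intro c d; rfl
  | cons a t ih =>
    intro c d
    simp only [List.foldl_cons]
    rw [max_assoc, ih]

theorem pv_f_nonneg (l : List Int) : 0 ≤ l.foldl max 0 := by
  have : ∀ c : Int, c ≤ l.foldl max c := by
    induction l with
    | nil => intro c; exact le_refl c
    | cons a t ih => intro c; exact le_trans (le_max_left c a) (ih (max c a))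
  exact this 0

theorem pv_f_append (a b : List Int) :
    (a ++ b).foldl max 0 = max (a.foldl max 0) (b.foldl max 0) := by
  rw [List.foldl_append]
  have h0 : a.foldl max 0 = max (a.foldl max 0) 0 := (max_eq_left (pv_f_nonneg a)).symm
  conv_lhs => rw [h0]
  rw [pv_foldl_max_shift]

-- the divide-and-conquer computes the running max of consecutive gaps, floored at 0
theorem pvDC_eq (xs : List Int) : pvDC xs = (pvAdj xs).foldl max 0 := by
  by_cases h : xs.length < 2
  · rw [pvDC, dif_pos h]
    match xs, h with
    | [], _ => rfl
    | [_], _ => rfl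
  · have hlen : 2 ≤ xs.length := by omega
    have key : pvDC xs = max (max (pvDC (xs.take (xs.length / 2))) (pvDC (xs.drop (xs.length / 2))))
        (xs.getD (xs.length / 2) 0 - xs.getD (xs.length / 2 - 1) 0) := by
      rw [pvDC, dif_neg h]
    rw [key]
    set m := xs.length / 2 with hm
    have hm1 : 1 ≤ m := by omega
    have hmlt : m < xs.length := by omega
    have ht : pvDC (xs.take m) = (pvAdj (xs.take m)).foldl max 0 := pvDC_eq (xs.take m)
    have hd : pvDC (xs.drop m) = (pvAdj (xs.drop m)).foldl max 0 := pvDC_eq (xs.drop m)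
    -- decompose xs = take m ++ xs[m] :: drop (m+1)
    have hxs : xs = xs.take m ++ xs[m] :: xs.drop (m + 1) := by
      conv_lhs => rw [← List.take_append_drop m xs]
      congr 1
      rw [List.drop_eq_getElem_cons hmlt]
    have htne : xs.take m ≠ [] := by
      intro hc
      rw [List.take_eq_nil_iff] at hc
      rcases hc with hc | hc
      · omega
      · simp [hc] at hmlt
    have hdropm : xs.drop m = xs[m] :: xs.drop (m + 1) := List.drop_eq_getElem_cons hmlt
    have hgetm : xs.getD m 0 = xs[m] := List.getD_eq_getElem xs 0 hmlt
    have hgetm1 : xs.getD (m - 1) 0 = (xs.take m).getLastD 0 := by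
      have hm1lt : m - 1 < xs.length := by omega
      rw [List.getD_eq_getElem xs 0 hm1lt]
      rw [List.getLastD_eq_getLast?]
      rw [List.getLast?_eq_getElem?]
      have hlt : (xs.take m).length - 1 = m - 1 := by rw [List.length_take]; omega
      rw [hlt]
      rw [List.getElem?_take]
      rw [if_pos (by omega)]
      rw [List.getElem?_eq_getElem hm1lt]
      rfl
    conv_rhs => rw [hxs]
    rw [pvAdj_split _ _ _ htne, ← hdropm, pvAdj_snoc _ htne, pv_f_append, pv_f_append]
    rw [ht, hd, hgetm, hgetm1]
    have h1 := pv_f_nonneg (pvAdj (xs.take m))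
    have h2 := pv_f_nonneg (pvAdj (xs.drop m))
    have h3 : ([xs[m] - (xs.take m).getLastD 0] : List Int).foldl max 0
        = max 0 (xs[m] - (xs.take m).getLastD 0) := rfl
    rw [h3]
    omega
termination_by xs.length
decreasing_by
  · simp only [List.length_take]; omega
  · simp only [List.length_drop]; omega

-- A's scan over the remaining seats computes the running max of consecutive gaps
theorem pv_stepA_aux (t : List Int) : ∀ (x acc : Int),
    (t.foldl pvStepA (acc, some x)).1
      = (((x :: t).zip t).map (fun p => p.2 - p.1)).foldl max acc := by
  induction t with
  | nil => intro x acc; rfl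
  | cons y t ih =>
    intro x acc
    simp only [List.foldl_cons, pvStepA, List.zip_cons_cons, List.map_cons]
    exact ih y (max acc (y - x))

theorem pv_foldl_stepA (l : List Int) :
    (l.foldl pvStepA ((0 : Int), (none : Option Int))).1
      = ((l.zip (l.drop 1)).map (fun p => p.2 - p.1)).foldl max 0 := by
  cases l with
  | nil => rfl
  | cons x t =>
    simp only [List.foldl_cons, pvStepA, List.drop_succ_cons, List.drop_zero]
    exact pv_stepA_aux t x 0

-- ===== VERDICT (by name: the statement is the Claim_ definition above) =====
theorem max_gap_after_removals_spec : Claim_equal_max_gap_after_removals := by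
  intro seats ris _
  unfold Spec_max_gap_after_removals max_gap_after_removals max_gap_after_removals_alt
  simp only [Int.ofNat_eq_natCast]
  have hpred : ∀ i ∈ List.range seats.length,
      (ris.foldl (fun removed idx => if 0 ≤ idx ∧ idx < (seats.length : Int) then removed.set idx.toNat true else removed)
        (List.replicate seats.length false)).getD i false
        = PySem.Set.contains (PySem.Set.ofList (ris.filter (fun idx => decide (0 ≤ idx ∧ idx < (seats.length : Int))))) ((i : Int)) := by
    intro i _
    rw [pv_removed_getD seats.length ris _ (by simp) i]
    simp only [List.getD, List.getElem?_replicate]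
    have : PySem.Set.contains (PySem.Set.ofList (ris.filter (fun idx => decide (0 ≤ idx ∧ idx < (seats.length : Int))))) ((i : Int))
        = decide (((i : Int)) ∈ ris.filter (fun idx => decide (0 ≤ idx ∧ idx < (seats.length : Int)))) := by
      simp [PySem.Set.contains, PySem.Set.mem_ofList]
    rw [this]
    split_ifs <;> simp
  rw [PySem.List.foldl_congr_mem (List.range seats.length) _
    (fun st i => if PySem.Set.contains (PySem.Set.ofList (ris.filter (fun idx => decide (0 ≤ idx ∧ idx < (seats.length : Int))))) ((i : Int)) then st else pvStepA st (seats.getD i 0)) _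
    (by intro acc x hx; simp only [hpred x hx])]
  rw [pv_foldl_guard, pv_foldl_stepA, ← pvAdj_eq_zip, ← pvDC_eq]
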